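-- pv_equiv track=rewrite | github.com/pypi-data/pypi-mirror-366 | packages/vector-db-query/vector_db_query-1.0.0-py3-none-any.whl/vector_db_query/data_sources/googledrive/processor.py | _format_action_items
-- ===== SOURCE A (Python) =====
-- from typing import Dict, Any, List, Optional, Tuple
--
-- def _format_action_items(action_items: List[Dict[str, Any]]) -> str:
--     """Format action items as markdown.
--
--     Args:
--         action_items: List of action items
--
--     Returns:
--         Markdown formatted action items
--     """
--     lines = ["# Action Items", ""]
--
--     # Group by assignee
--     by_assignee = {}
--     unassigned = []
--
--     for item in action_items:
--         if 'assignee' in item: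
--             assignee = item['assignee']
--             if assignee not in by_assignee:
--                 by_assignee[assignee] = []
--             by_assignee[assignee].append(item)
--         else:
--             unassigned.append(item)
--
--     # Format by assignee
--     for assignee, items in sorted(by_assignee.items()):
--         lines.append(f"## {assignee}")
--         for item in items:
--             lines.append(f"- [ ] {item['task']}")
--             if item.get('due_date'):
--                 lines.append(f"  - Due: {item['due_date']}")
--         lines.append("")
--
--     # Unassigned items
--     if unassigned:
--         lines.append("## Unassigned")
--         for item in unassigned:
--             lines.append(f"- [ ] {item['task']}")
--             if item.get('due_date'):
--                 lines.append(f"  - Due: {item['due_date']}")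
--
--     return '\n'.join(lines)
-- ===== SOURCE B (Python) =====
-- from typing import Dict, Any, List
--
--
-- def _item_lines(item: Dict[str, Any]) -> List[str]:
--     """Markdown lines for one action item."""
--     lines = [f"- [ ] {item['task']}"]
--     if item.get('due_date'):
--         lines.append(f"  - Due: {item['due_date']}")
--     return lines
--
--
-- def _format_action_items(action_items: List[Dict[str, Any]]) -> str:
--     """Format action items as markdown, grouped by assignee."""
--     assigned = [it for it in action_items if 'assignee' in it]
--     out = ["# Action Items", ""]
--     for a in sorted({it['assignee'] for it in assigned}):
--         out.append(f"## {a}")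
--         for it in assigned:
--             if it['assignee'] == a:
--                 out += _item_lines(it)
--         out.append("")
--     unassigned = [it for it in action_items if 'assignee' not in it]
--     if unassigned:
--         out.append("## Unassigned")
--         for it in unassigned:
--             out += _item_lines(it)
--     return "\n".join(out)
-- ===== Notes on version B (the rewrite author's own statement) =====
-- stated objective: alternative
-- what changed: Replaces A's one-pass dict-of-lists grouping followed by sorting the (assignee, items) pairs with a dict-free decomposition: collect the set of assignees, sort it, and emit each assignee's block by filtering the assigned items per assignee, with a shared _item_lines helper for per-item formatting.
import Mathlib
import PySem

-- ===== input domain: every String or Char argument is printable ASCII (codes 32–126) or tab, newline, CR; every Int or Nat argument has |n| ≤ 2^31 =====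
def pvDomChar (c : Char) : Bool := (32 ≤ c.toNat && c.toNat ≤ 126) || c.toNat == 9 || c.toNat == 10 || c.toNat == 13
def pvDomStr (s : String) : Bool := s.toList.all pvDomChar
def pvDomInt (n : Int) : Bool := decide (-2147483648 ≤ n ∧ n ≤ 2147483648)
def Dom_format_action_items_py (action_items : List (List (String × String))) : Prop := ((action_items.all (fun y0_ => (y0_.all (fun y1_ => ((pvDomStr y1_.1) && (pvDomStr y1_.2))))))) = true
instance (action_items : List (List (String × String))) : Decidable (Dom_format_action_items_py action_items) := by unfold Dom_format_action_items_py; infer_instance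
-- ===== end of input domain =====

-- B replaces A's dict-of-lists grouping + pair sort with sort-the-assignee-set then filter per assignee (alternative decomposition, not claimed faster). Pre_ excludes only inputs where A raises KeyError (an item without a 'task' key).

-- ===== PORT A =====
-- A's grouping loop: one step of `for item in action_items` threading (by_assignee, unassigned).
def pvA_step (s : PySem.Dict String (List (List (String × String))) × List (List (String × String)))
    (item : List (String × String)) :
    PySem.Dict String (List (List (String × String))) × List (List (String × String)) :=
  if (PySem.Dict.mk item).contains "assignee" then
    -- `if assignee not in by_assignee: by_assignee[assignee] = []` then append = Dict.modify with default []
    (s.1.modify ((PySem.Dict.mk item).getD "assignee" "") [] (· ++ [item]), s.2)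
  else
    (s.1, s.2 ++ [item])

-- A's two item-formatting lines: append the task line, then the due line if `item.get('due_date')` is truthy
-- (absent or "" — exactly `getD "due_date" "" ≠ ""`, since values are strings).
def pvA_emitItem (lines : List String) (item : List (String × String)) : List String :=
  let lines := lines ++ ["- [ ] " ++ (PySem.Dict.mk item).getD "task" ""]
  if (PySem.Dict.mk item).getD "due_date" "" ≠ "" then
    lines ++ ["  - Due: " ++ (PySem.Dict.mk item).getD "due_date" ""]
  else lines

-- `sorted(by_assignee.items())` compares (assignee, items) tuples; assignees (dict keys) are distinct, so the
-- second components are never compared: key = first component is exact here. `item['task']` (KeyError) is total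
-- under Pre_ and ported as getD.
def format_action_items_py (action_items : List (List (String × String))) : String :=
  let lines : List String := ["# Action Items", ""]
  let s := action_items.foldl pvA_step (PySem.Dict.empty, [])
  let lines := (PySem.List.sorted s.1.items (fun p => p.1) false).foldl
      (fun lines kv => (kv.2.foldl pvA_emitItem (lines ++ ["## " ++ kv.1])) ++ [""]) lines
  let lines := if s.2 ≠ [] then s.2.foldl pvA_emitItem (lines ++ ["## Unassigned"]) else lines
  PySem.Str.join "\n" lines

-- ===== PORT B =====
-- B's helper `_item_lines`
def pvB_itemLines (item : List (String × String)) : List String :=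
  let ls : List String := ["- [ ] " ++ (PySem.Dict.mk item).getD "task" ""]
  if (PySem.Dict.mk item).getD "due_date" "" ≠ "" then
    ls ++ ["  - Due: " ++ (PySem.Dict.mk item).getD "due_date" ""]
  else ls

-- `sorted({it['assignee'] for it in assigned})` = sorted (PySem.Set.ofList …) with the identity key
-- (order-safe: no key ties on a set); `it['assignee']` is present for every `it ∈ assigned`, ported as getD.
def format_action_items_py_alt (action_items : List (List (String × String))) : String :=
  let assigned := action_items.filter (fun it => (PySem.Dict.mk it).contains "assignee")
  let out : List String := ["# Action Items", ""]
  let out := (PySem.List.sorted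
      (PySem.Set.ofList (assigned.map (fun it => (PySem.Dict.mk it).getD "assignee" "")))
      (fun a => a) false).foldl
      (fun out a =>
        (assigned.foldl
          (fun out it =>
            if (PySem.Dict.mk it).getD "assignee" "" == a then out ++ pvB_itemLines it else out)
          (out ++ ["## " ++ a])) ++ [""]) out
  let unassigned := action_items.filter (fun it => !(PySem.Dict.mk it).contains "assignee")
  let out := if unassigned ≠ [] then
      unassigned.foldl (fun out it => out ++ pvB_itemLines it) (out ++ ["## Unassigned"])
    else out
  PySem.Str.join "\n" out

-- ===== PRECONDITION & SPEC =====
-- Pre_ excludes exactly the inputs where A raises: an item with no 'task' key (KeyError at item['task']).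
def Pre_format_action_items_py (action_items : List (List (String × String))) : Prop :=
  ∀ it ∈ action_items, (PySem.Dict.mk it).contains "task" = true
instance (action_items : List (List (String × String))) : Decidable (Pre_format_action_items_py action_items) := by
  unfold Pre_format_action_items_py; infer_instance

def pvWitness_format_action_items_py : (List (List (String × String))) :=
  [[("task", "write report"), ("assignee", "alice"), ("due_date", "Friday")], [("task", "file it")]]

def Spec_format_action_items_py (action_items : List (List (String × String))) (out : String) : Prop :=
  out = format_action_items_py_alt action_items
instance (action_items : List (List (String × String))) (out : String) : Decidable (Spec_format_action_items_py action_items out) := by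
  unfold Spec_format_action_items_py; infer_instance

-- ===== CLAIM =====
def Claim_equal_format_action_items_py : Prop :=
  ∀ (action_items : List (List (String × String))), Dom_format_action_items_py action_items →
    Pre_format_action_items_py action_items →
    Spec_format_action_items_py action_items (format_action_items_py action_items)

-- ===== LEMMAS AND PROOFS =====

theorem emit_eq : pvA_emitItem = fun L it => L ++ pvB_itemLines it := by
  funext L it
  simp only [pvA_emitItem, pvB_itemLines]
  split <;> simp

theorem items_eq_map_keys {κ ν : Type} [BEq κ] [LawfulBEq κ] (d : PySem.Dict κ ν) (v0 : ν)
    (h : d.keys.Nodup) : d.items = d.keys.map (fun k => (k, d.getD k v0)) := by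
  have hk : d.keys = d.items.map Prod.fst := by simp only [PySem.Dict.keys]
  rw [hk, List.map_map]
  conv_lhs => rw [← List.map_id d.items]
  apply List.map_congr_left
  intro p hp
  have := PySem.Dict.getD_of_mem_items (d := d) (k := p.1) (v := p.2) (d0 := v0) (by simpa using hp) h
  simp [Function.comp, this]

theorem sorted_map_fst {α : Type} (K : List String) (g : String → String × α)
    (hg : ∀ k, (g k).1 = k)
    (hnd : K.Nodup) :
    PySem.List.sorted (K.map g) (fun p => p.1) false = (PySem.List.sorted K (fun x => x) false).map g := by
  apply PySem.List.sorted_eq_of_perm_of_pairwise_lt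
  · exact ((PySem.List.sorted_perm K (fun x => x) false).map g)
  · have hs : (PySem.List.sorted K (fun x => x) false).Pairwise (· < ·) := by
      have hle := PySem.List.sorted_pairwise (xs := K) (key := fun x => x)
      have hnd : (PySem.List.sorted K (fun x => x) false).Nodup :=
        ((PySem.List.sorted_perm K (fun x => x) false).nodup_iff).mpr hnd
      exact (hle.and hnd).imp (fun h => lt_of_le_of_ne h.1 h.2)
    exact hs.map _ (fun a b hab => by simpa [hg] using hab)

theorem state_fold_eq (action_items : List (List (String × String))) :
    action_items.foldl pvA_step (PySem.Dict.empty, []) =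
    ((action_items.filter (fun it => (PySem.Dict.mk it).contains "assignee")).foldl
        (fun d it => d.modify ((PySem.Dict.mk it).getD "assignee" "") [] (· ++ [it])) PySem.Dict.empty,
      action_items.filter (fun it => !(PySem.Dict.mk it).contains "assignee")) := by
  have hstep : pvA_step = fun s item =>
      ((if (PySem.Dict.mk item).contains "assignee" then
          s.1.modify ((PySem.Dict.mk item).getD "assignee" "") [] (· ++ [item]) else s.1),
       (if !(PySem.Dict.mk item).contains "assignee" then s.2 ++ [item] else s.2)) := by
    funext s item
    simp only [pvA_step]
    by_cases h : (PySem.Dict.mk item).contains "assignee" <;> simp [h]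
  rw [hstep]
  rw [PySem.List.foldl_prod_mk
      (f := fun d item => if (PySem.Dict.mk item).contains "assignee" then
          PySem.Dict.modify d ((PySem.Dict.mk item).getD "assignee" "") [] (· ++ [item]) else d)
      (g := fun u item => if !(PySem.Dict.mk item).contains "assignee" then u ++ [item] else u)]
  rw [PySem.List.foldl_if_eq_foldl_filter, PySem.List.foldl_append_if_eq_filter]
  simp

theorem grp_eq (assigned : List (List (String × String))) (a : String) :
    (assigned.foldl (fun d it => d.modify ((PySem.Dict.mk it).getD "assignee" "") [] (· ++ [it]))
        PySem.Dict.empty).getD a [] =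
    assigned.filter (fun it => (PySem.Dict.mk it).getD "assignee" "" == a) := by
  have hmap : assigned.foldl
      (fun d it => d.modify ((PySem.Dict.mk it).getD "assignee" "") [] (· ++ [it])) PySem.Dict.empty
      = (assigned.map (fun it => ((PySem.Dict.mk it).getD "assignee" "", it))).foldl
          (fun d p => d.modify p.1 [] (· ++ [p.2])) PySem.Dict.empty := by
    rw [List.foldl_map]
  rw [hmap, PySem.Dict.getD_foldl_modify_append]
  simp [List.filter_map, Function.comp_def]

theorem keys_eq (assigned : List (List (String × String))) :
    (assigned.foldl (fun d it => d.modify ((PySem.Dict.mk it).getD "assignee" "") [] (· ++ [it]))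
        PySem.Dict.empty).keys =
    PySem.Set.ofList (assigned.map (fun it => (PySem.Dict.mk it).getD "assignee" "")) := by
  rw [PySem.Dict.keys_foldl_modify_key (key := fun it => (PySem.Dict.mk it).getD "assignee" "")
      (f := fun _ it => (· ++ [it]))]
  simp [PySem.Set.update_nil_left]


theorem format_action_items_py_main (action_items : List (List (String × String))) :
    format_action_items_py action_items = format_action_items_py_alt action_items := by
  simp only [format_action_items_py, format_action_items_py_alt]
  rw [state_fold_eq]
  set c : List (String × String) → Bool := fun it => (PySem.Dict.mk it).contains "assignee" with hc
  set key : List (String × String) → String := fun it => (PySem.Dict.mk it).getD "assignee" "" with hkey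
  set assigned := action_items.filter c with hassigned
  set dA := assigned.foldl (fun d it => d.modify (key it) [] (· ++ [it])) PySem.Dict.empty with hdA
  have hkeys : dA.keys = PySem.Set.ofList (assigned.map key) := keys_eq assigned
  have hnd : dA.keys.Nodup := by rw [hkeys]; exact PySem.Set.nodup_ofList _
  have hitems : dA.items = dA.keys.map (fun k => (k, dA.getD k [])) := items_eq_map_keys dA [] hnd
  have hsorted : PySem.List.sorted dA.items (fun p => p.1) false
      = (PySem.List.sorted (PySem.Set.ofList (assigned.map key)) (fun x => x) false).map
          (fun k => (k, dA.getD k [])) := by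
    rw [hitems, hkeys]
    exact sorted_map_fst _ _ (fun k => rfl) (PySem.Set.nodup_ofList _)
  congr 1
  rw [hsorted, List.foldl_map, emit_eq]
  dsimp only
  have hmid : ∀ init : List String,
      (PySem.List.sorted (PySem.Set.ofList (assigned.map key)) (fun x => x) false).foldl
        (fun acc k => ((dA.getD k []).foldl (fun L it => L ++ pvB_itemLines it) (acc ++ ["## " ++ k])) ++ [""]) init
      = (PySem.List.sorted (PySem.Set.ofList (assigned.map key)) (fun x => x) false).foldl
        (fun out a => (assigned.foldl (fun out it =>
              if (PySem.Dict.mk it).getD "assignee" "" == a then out ++ pvB_itemLines it else out)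
            (out ++ ["## " ++ a])) ++ [""]) init := by
    intro init
    apply PySem.List.foldl_congr_mem
    intro acc k hk
    rw [grp_eq, PySem.List.foldl_if_eq_foldl_filter]
  split
  · congr 2
    exact hmid _
  · exact hmid _

-- ===== VERDICT =====
theorem format_action_items_py_spec : Claim_equal_format_action_items_py := by
  intro ai _ _
  exact format_action_items_py_main ai
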